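-- pv_equiv track=rewrite | github.com/Yterayut/vm-daily-report-system | enhanced_line_notifications.py | group_alerts_by_vm
-- ===== SOURCE A (Python) =====
-- from typing import List, Dict, Any
--
-- def group_alerts_by_vm(alerts: List[Dict]) -> Dict[str, List[Dict]]:
--     """Group alerts by VM for consolidated messaging"""
--     grouped = {}
--     for alert in alerts:
--         vm_name = alert.get("vm", "Unknown")
--         if vm_name not in grouped:
--             grouped[vm_name] = []
--         grouped[vm_name].append(alert)
--     return grouped
-- ===== SOURCE B (Python) =====
-- def group_alerts_by_vm(alerts):
--     """Group alerts by VM for consolidated messaging"""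
--     seen = []
--     for alert in alerts:
--         vm = alert.get("vm", "Unknown")
--         if vm not in seen:
--             seen.append(vm)
--     return {vm: [a for a in alerts if a.get("vm", "Unknown") == vm] for vm in seen}
-- ===== Notes on version B (the rewrite author's own statement) =====
-- stated objective: alternative
-- what changed: B replaces A's single accumulating dict-building pass by a two-phase plan: one pass collecting the distinct VM names in first-appearance order, then a per-name filtering scan building each group as a comprehension.
import Mathlib
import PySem

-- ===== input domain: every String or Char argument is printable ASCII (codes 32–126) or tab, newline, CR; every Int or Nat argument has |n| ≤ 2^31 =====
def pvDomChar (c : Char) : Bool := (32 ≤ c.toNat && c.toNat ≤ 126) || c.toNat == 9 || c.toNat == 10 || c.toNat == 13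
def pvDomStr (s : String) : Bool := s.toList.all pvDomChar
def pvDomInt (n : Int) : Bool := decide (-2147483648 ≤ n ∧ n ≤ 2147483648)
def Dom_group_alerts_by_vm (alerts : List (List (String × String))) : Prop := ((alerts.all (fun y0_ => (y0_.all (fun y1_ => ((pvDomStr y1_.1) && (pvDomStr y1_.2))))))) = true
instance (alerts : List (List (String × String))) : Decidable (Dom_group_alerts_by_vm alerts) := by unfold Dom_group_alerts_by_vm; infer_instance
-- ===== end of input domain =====

-- B groups alerts by first collecting the distinct VM names and then filtering the
-- alert list once per name (alternative decomposition; same return value as A).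


-- ===== PORT A =====
-- alert.get("vm", "Unknown"): first-match lookup in the association list (exact dict semantics)
def pvGetVm (a : List (String × String)) : String :=
  ((a.find? (fun p => p.1 == "vm")).map (·.2)).getD "Unknown"

def pvStepA (grouped : List (String × List (List (String × String)))) (alert : List (String × String)) : List (String × List (List (String × String))) :=
  let vm := pvGetVm alert
  let g1 := if grouped.any (fun e => e.1 == vm) then grouped else grouped ++ [(vm, [])]
  g1.map (fun e => if e.1 == vm then (e.1, e.2 ++ [alert]) else e)

def group_alerts_by_vm (alerts : List (List (String × String))) : List (String × List (List (String × String))) :=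
  alerts.foldl pvStepA []

-- ===== PORT B =====
def pvDistinctVms (alerts : List (List (String × String))) : List String :=
  alerts.foldl (fun ns a => if ns.contains (pvGetVm a) then ns else ns ++ [pvGetVm a]) []

def group_alerts_by_vm_alt (alerts : List (List (String × String))) : List (String × List (List (String × String))) :=
  (pvDistinctVms alerts).map (fun vm => (vm, alerts.filter (fun a => pvGetVm a == vm)))

-- ===== PRECONDITION & SPEC =====
def Spec_group_alerts_by_vm (alerts : List (List (String × String))) (out : List (String × List (List (String × String)))) : Prop := out = group_alerts_by_vm_alt alerts
instance (alerts : List (List (String × String))) (out : List (String × List (List (String × String)))) : Decidable (Spec_group_alerts_by_vm alerts out) := by unfold Spec_group_alerts_by_vm; infer_instance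

-- ===== CLAIM (what is proved, stated in full; the proofs are below) =====
def Claim_equal_group_alerts_by_vm : Prop := ∀ (alerts : List (List (String × String))), Dom_group_alerts_by_vm alerts → Spec_group_alerts_by_vm alerts (group_alerts_by_vm alerts)

-- ===== LEMMAS AND PROOFS =====

-- B's value on a list l, as a function (used as the invariant of A's fold)
def pvG (l : List (List (String × String))) : List (String × List (List (String × String))) :=
  (pvDistinctVms l).map (fun vm => (vm, l.filter (fun a => pvGetVm a == vm)))

theorem pvDistinctVms_append_one (p : List (List (String × String))) (a : List (String × String)) :
    pvDistinctVms (p ++ [a]) =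
      if (pvDistinctVms p).contains (pvGetVm a) then pvDistinctVms p
      else pvDistinctVms p ++ [pvGetVm a] := by
  simp [pvDistinctVms, List.foldl_append]

theorem mem_pvDistinctVms (x : String) (l : List (List (String × String))) :
    x ∈ pvDistinctVms l ↔ ∃ a ∈ l, pvGetVm a = x := by
  induction l using List.reverseRecOn with
  | nil => simp [pvDistinctVms]
  | append_singleton p a ih =>
    rw [pvDistinctVms_append_one]
    split
    · rename_i h
      simp only [List.contains_iff_mem] at h
      constructor
      · intro hx; rcases ih.mp hx with ⟨b, hb, hbe⟩; exact ⟨b, by simp [hb], hbe⟩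
      · rintro ⟨b, hb, hbe⟩
        rcases List.mem_append.mp hb with hb | hb
        · exact ih.mpr ⟨b, hb, hbe⟩
        · simp at hb; subst hb; subst hbe; exact h
    · constructor
      · intro hx
        rcases List.mem_append.mp hx with hx | hx
        · rcases ih.mp hx with ⟨b, hb, hbe⟩; exact ⟨b, by simp [hb], hbe⟩
        · simp at hx; exact ⟨a, by simp, hx.symm⟩
      · rintro ⟨b, hb, hbe⟩
        rcases List.mem_append.mp hb with hb | hb
        · exact List.mem_append.mpr (Or.inl (ih.mpr ⟨b, hb, hbe⟩))
        · simp at hb; subst hb; simp [hbe]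

-- the keys of pvG p are exactly pvDistinctVms p
theorem keys_pvG (p : List (List (String × String))) (vm : String) :
    (pvG p).any (fun e => e.1 == vm) = (pvDistinctVms p).contains vm := by
  rw [Bool.eq_iff_iff]
  simp [pvG, List.any_map, Function.comp, List.any_eq_true]

theorem filter_nil_of_not_mem (p : List (List (String × String))) (vm : String)
    (h : vm ∉ pvDistinctVms p) : p.filter (fun a => pvGetVm a == vm) = [] := by
  rw [List.filter_eq_nil_iff]
  intro a ha hc
  exact h ((mem_pvDistinctVms vm p).mpr ⟨a, ha, by simpa using hc⟩)

-- one step of A's fold, applied to pvG p, yields pvG (p ++ [alert])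
theorem step_pvG (p : List (List (String × String))) (alert : List (String × String)) :
    pvStepA (pvG p) alert = pvG (p ++ [alert]) := by
  unfold pvStepA
  simp only []
  set vm := pvGetVm alert with hvm
  rw [keys_pvG]
  unfold pvG
  rw [pvDistinctVms_append_one, ← hvm]
  by_cases hmem : vm ∈ pvDistinctVms p
  · have hc : (pvDistinctVms p).contains vm = true := List.contains_iff_mem.mpr hmem
    rw [hc, if_pos rfl, if_pos rfl, List.map_map]
    apply List.map_congr_left
    intro x hx
    simp only [Function.comp]
    rw [List.filter_append]
    by_cases hxvm : x = vm
    · subst hxvm; simp [← hvm]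
    · have : (x == vm) = false := by simpa using hxvm
      have h2 : (vm == x) = false := by simpa using (Ne.symm hxvm)
      simp [this, List.filter, h2, ← hvm]
  · have hc : (pvDistinctVms p).contains vm = false := by
      simpa using hmem
    rw [hc, if_neg (by simp), if_neg (by simp), List.map_append, List.map_map]
    rw [List.map_append]
    congr 1
    · apply List.map_congr_left
      intro x hx
      simp only [Function.comp]
      have hxvm : x ≠ vm := fun h => hmem (h ▸ hx)
      have : (x == vm) = false := by simpa using hxvm
      have h2 : (vm == x) = false := by simpa using (Ne.symm hxvm)
      rw [List.filter_append]
      simp [this, List.filter, h2, ← hvm]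
    · simp [List.filter_append, List.filter, filter_nil_of_not_mem p vm hmem, ← hvm]

theorem foldA_pvG (l p : List (List (String × String))) :
    l.foldl pvStepA (pvG p) = pvG (p ++ l) := by
  induction l generalizing p with
  | nil => simp
  | cons a t ih =>
    simp only [List.foldl_cons]
    rw [step_pvG p a, ih (p ++ [a])]
    simp

-- ===== VERDICT (by name: the statement is the Claim_ definition above) =====
theorem group_alerts_by_vm_spec : Claim_equal_group_alerts_by_vm := by
  intro alerts _
  unfold Spec_group_alerts_by_vm group_alerts_by_vm group_alerts_by_vm_alt
  have h0 : (pvG [] : List (String × List (List (String × String)))) = [] := by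
    simp [pvG, pvDistinctVms]
  calc alerts.foldl _ [] = pvG ([] ++ alerts) := by rw [← h0]; exact foldA_pvG alerts []
    _ = group_alerts_by_vm_alt alerts := by simp [pvG, group_alerts_by_vm_alt]
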